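-- pv_equiv track=rewrite | github.com/FraNny77/learngit | 公约数.py | depatch
-- ===== SOURCE A (Python) =====
-- def getPrimes(n):
--     vis = [0 for i in range(n+10)]
--     minp = [0 for i in range(n+10)]
--     primes = []
--     for i in range(2, n+1):
--         if not vis[i]:
--             primes.append(i)
--             minp[i] = i
--         j = 0
--         while i*primes[j] <= n:
--             minp[i*primes[j]] = primes[j]
--             vis[i*primes[j]] = 1
--             if i % primes[j] == 0:
--                 break
--             j += 1
--     return minp
--
-- def depatch(n):
--     minp = getPrimes(n)
--     dic = {}
--     for i in range(2,n+1):
--         curP = minp[i]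
--         while i%curP ==0:
--             dic[curP]=dic.get(curP,0)+1
--             i//=curP
--     return dic
-- ===== SOURCE B (Python) =====
-- def depatch(n):
--     # For each i in 2..n, add the multiplicity of i's smallest prime factor
--     # (found by trial division up to sqrt(i); no sieve, no arrays).
--     dic = {}
--     for i in range(2, n + 1):
--         p = 2
--         while p * p <= i and i % p != 0:
--             p += 1
--         if i % p != 0:
--             p = i  # i is prime
--         e = 0
--         m = i
--         while m % p == 0:
--             e += 1
--             m //= p
--         dic[p] = dic.get(p, 0) + e
--     return dic
-- ===== Notes on version B (the rewrite author's own statement) =====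
-- stated objective: simpler
-- what changed: Replaces the linear sieve (vis/minp/primes arrays) plus per-number smallest-factor peel-off with a single sieve-free pass: for each i in 2..n the smallest prime factor is found by trial division up to sqrt(i) and its multiplicity is added to the dict once.
import Mathlib
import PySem

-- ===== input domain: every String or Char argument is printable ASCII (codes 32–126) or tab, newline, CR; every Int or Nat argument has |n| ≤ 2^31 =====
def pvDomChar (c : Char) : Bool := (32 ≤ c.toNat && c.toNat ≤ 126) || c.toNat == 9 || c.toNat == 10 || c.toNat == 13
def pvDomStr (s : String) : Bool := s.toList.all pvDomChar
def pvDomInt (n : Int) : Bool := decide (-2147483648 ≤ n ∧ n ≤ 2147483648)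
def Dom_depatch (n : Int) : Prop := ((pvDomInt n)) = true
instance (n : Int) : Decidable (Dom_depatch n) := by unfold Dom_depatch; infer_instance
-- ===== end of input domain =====

-- B replaces A's linear sieve + per-number peel-off loop with a single sieve-free pass
-- (trial division up to sqrt(i) for the smallest prime factor, then one counted division
-- loop); objective: simpler (no arrays, no sieve), not faster.

-- ===== PORT A =====
-- Python lists vis/minp/primes are modelled as Array Int; every index that A reads or
-- writes is nonnegative and in range on every reachable state, so getD/setIfInBounds
-- coincide with Python's indexing there.
def pvAGet (a : Array Int) (i : Int) : Int := a.getD i.toNat 0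
def pvASet (a : Array Int) (i : Int) (v : Int) : Array Int := a.setIfInBounds i.toNat v

-- the inner `while i*primes[j] <= n` loop of getPrimes; fuel = primes.size suffices:
-- the loop always breaks at the smallest prime factor of i, which is in primes
-- (the fuel-0 / out-of-range branches are unreachable where Python returns).
def pvInner (n i : Int) (primes : Array Int) (vis minp : Array Int) (j fuel : Nat) :
    Array Int × Array Int :=
  match fuel with
  | 0 => (vis, minp)
  | fuel' + 1 =>
    if hj : j < primes.size then
      let p := primes[j]
      if i * p ≤ n then
        let minp' := pvASet minp (i * p) p
        let vis' := pvASet vis (i * p) 1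
        if PySem.Int.mod i p = 0 then (vis', minp')
        else pvInner n i primes vis' minp' (j + 1) fuel'
      else (vis, minp)
    else (vis, minp)

-- one iteration of `for i in range(2, n+1)` in getPrimes
def pvSieveStep (n : Int) (st : Array Int × Array Int × Array Int) (i : Int) :
    Array Int × Array Int × Array Int :=
  let vis := st.1
  let minp := st.2.1
  let primes := st.2.2
  let primes' := if pvAGet vis i = 0 then primes.push i else primes
  let minp' := if pvAGet vis i = 0 then pvASet minp i i else minp
  let r := pvInner n i primes' vis minp' 0 primes'.size
  (r.1, r.2, primes')

def getPrimesA (n : Int) : Array Int :=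
  ((PySem.List.pyRange 2 (n + 1) 1).foldl (pvSieveStep n)
    (Array.replicate (n + 10).toNat 0, Array.replicate (n + 10).toNat 0, (#[] : Array Int))).2.1

-- `while i % curP == 0: dic[curP] = dic.get(curP,0)+1; i //= curP`; fuel i.toNat+1
-- bounds the number of divisions (curP ≥ 2 on every reachable call).
def pvWhileA (dic : PySem.Dict Int Int) (i curP : Int) (fuel : Nat) : PySem.Dict Int Int :=
  match fuel with
  | 0 => dic
  | fuel' + 1 =>
    if PySem.Int.mod i curP = 0 then
      pvWhileA (dic.insert curP (dic.getD curP 0 + 1)) (PySem.Int.floordiv i curP) curP fuel'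
    else dic

def depatch (n : Int) : List (Int × Int) :=
  let minp := getPrimesA n
  ((PySem.List.pyRange 2 (n + 1) 1).foldl
    (fun dic i => pvWhileA dic i (pvAGet minp i) (i.toNat + 1)) PySem.Dict.empty).items

-- ===== PORT B =====
-- `p = 2; while p*p <= i and i % p != 0: p += 1`; fuel i.toNat bounds the increments
def pvSpfLoop (i p : Int) (fuel : Nat) : Int :=
  match fuel with
  | 0 => p
  | fuel' + 1 =>
    if p * p ≤ i ∧ ¬ PySem.Int.mod i p = 0 then pvSpfLoop i (p + 1) fuel' else p

-- `e = 0; m = i; while m % p == 0: e += 1; m //= p` (e is the accumulator)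
def pvCountDiv (m p e : Int) (fuel : Nat) : Int :=
  match fuel with
  | 0 => e
  | fuel' + 1 =>
    if PySem.Int.mod m p = 0 then pvCountDiv (PySem.Int.floordiv m p) p (e + 1) fuel' else e

def depatch_alt (n : Int) : List (Int × Int) :=
  ((PySem.List.pyRange 2 (n + 1) 1).foldl
    (fun dic i =>
      let p0 := pvSpfLoop i 2 i.toNat
      let p := if ¬ PySem.Int.mod i p0 = 0 then i else p0
      let e := pvCountDiv i p 0 i.toNat
      dic.insert p (dic.getD p 0 + e)) PySem.Dict.empty).items

-- ===== PRECONDITION & SPEC =====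
def Spec_depatch (n : Int) (out : List (Int × Int)) : Prop := out = depatch_alt n
instance (n : Int) (out : List (Int × Int)) : Decidable (Spec_depatch n out) := by
  unfold Spec_depatch; infer_instance

-- ===== CLAIM (what is proved, stated in full; the proofs are below) =====
def Claim_equal_depatch : Prop := ∀ (n : Int), Dom_depatch n → Spec_depatch n (depatch n)

-- ===== LEMMAS AND PROOFS =====

-- (i.toNat.minFac : Int): the smallest prime factor, the value both programs compute per i
def mF (i : Int) : Int := (i.toNat.minFac : Int)

theorem getD_pvASet (a : Array Int) (k v : Int) (m : Nat) :
    (pvASet a k v).getD m 0 = if k.toNat = m ∧ m < a.size then v else a.getD m 0 := by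
  unfold pvASet
  rw [Array.getD_eq_getD_getElem?, Array.getD_eq_getD_getElem?, Array.getElem?_setIfInBounds]
  by_cases hk : k.toNat = m
  · subst hk
    by_cases hm : k.toNat < a.size <;> simp [hm]
  · simp [hk, Option.getD]

theorem size_pvASet (a : Array Int) (k v : Int) : (pvASet a k v).size = a.size :=
  Array.size_setIfInBounds

-- ---- B-side: the trial-division loop finds the smallest prime factor ----

theorem pvSpfLoop_ge (i : Int) (fuel : Nat) : ∀ p : Int, 2 ≤ p → 2 ≤ pvSpfLoop i p fuel := by
  induction fuel with
  | zero => intro p h; simpa [pvSpfLoop] using h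
  | succ fuel ih =>
    intro p h
    unfold pvSpfLoop
    split
    · exact ih (p + 1) (by omega)
    · exact h

theorem int_dvd_iff_toNat (i q : Int) (hi : 0 ≤ i) (hq : 0 ≤ q) :
    q ∣ i ↔ q.toNat ∣ i.toNat := by
  rw [← Int.natCast_dvd_natCast, Int.toNat_of_nonneg hi, Int.toNat_of_nonneg hq]

theorem mF_facts (i : Int) (hi : 2 ≤ i) :
    2 ≤ mF i ∧ mF i ∣ i ∧ mF i ≤ i ∧ ∀ q : Int, 2 ≤ q → q ∣ i → mF i ≤ q := by
  have hN : 2 ≤ i.toNat := by omega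
  have hpr := Nat.minFac_prime (by omega : i.toNat ≠ 1)
  refine ⟨by unfold mF; exact_mod_cast hpr.two_le, ?_, ?_, ?_⟩
  · rw [int_dvd_iff_toNat i (mF i) (by omega) (by unfold mF; positivity)]
    simpa [mF] using Nat.minFac_dvd i.toNat
  · have := Nat.minFac_le (by omega : 0 < i.toNat)
    unfold mF; omega
  · intro q hq hdvd
    rw [int_dvd_iff_toNat i q (by omega) (by omega)] at hdvd
    have := Nat.minFac_le_of_dvd (by omega) hdvd
    unfold mF; omega

theorem pvSpfLoop_stop (i p : Int) (fuel : Nat)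
    (h : ¬ (p * p ≤ i ∧ ¬ PySem.Int.mod i p = 0)) : pvSpfLoop i p fuel = p := by
  cases fuel with
  | zero => rfl
  | succ fuel => unfold pvSpfLoop; rw [if_neg h]

theorem pvSpfLoop_reach (i : Int) (hi : 2 ≤ i) (hsq : mF i * mF i ≤ i) :
    ∀ (fuel : Nat) (p : Int), 2 ≤ p → p ≤ mF i →
      (∀ q : Int, 2 ≤ q → q < p → ¬ q ∣ i) → (mF i - p).toNat ≤ fuel →
      pvSpfLoop i p fuel = mF i := by
  obtain ⟨hmf2, hmfdvd, hmfle, hmin⟩ := mF_facts i hi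
  intro fuel
  induction fuel with
  | zero =>
    intro p h2 hle hnd hfuel
    have hp : p = mF i := by omega
    subst hp
    rfl
  | succ fuel ih =>
    intro p h2 hle hnd hfuel
    by_cases hp : p = mF i
    · subst hp
      apply pvSpfLoop_stop
      rw [PySem.Int.mod_eq_zero_iff_dvd]
      intro hc
      exact hc.2 hmfdvd
    · have hplt : p < mF i := by omega
      have hcond : p * p ≤ i ∧ ¬ PySem.Int.mod i p = 0 := by
        refine ⟨by nlinarith, ?_⟩
        rw [PySem.Int.mod_eq_zero_iff_dvd]
        intro hdvd
        have := hmin p h2 hdvd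
        omega
      unfold pvSpfLoop
      rw [if_pos hcond]
      refine ih (p + 1) (by omega) (by omega) ?_ (by omega)
      intro q hq2 hqlt hqdvd
      by_cases hqp : q = p
      · subst hqp
        have := hmin q hq2 hqdvd
        omega
      · exact hnd q hq2 (by omega) hqdvd

theorem bSpf_eq_mF (i : Int) (hi : 2 ≤ i) :
    (if ¬ PySem.Int.mod i (pvSpfLoop i 2 i.toNat) = 0 then i else pvSpfLoop i 2 i.toNat)
      = mF i := by
  obtain ⟨hmf2, hmfdvd, hmfle, hmin⟩ := mF_facts i hi
  by_cases hpr : i.toNat.Prime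
  · have hmfi : mF i = i := by
      unfold mF
      rw [hpr.minFac_eq]
      omega
    by_cases h : PySem.Int.mod i (pvSpfLoop i 2 i.toNat) = 0
    · rw [if_neg (by simpa using h)]
      have h2 : 2 ≤ pvSpfLoop i 2 i.toNat := pvSpfLoop_ge i i.toNat 2 le_rfl
      have hdvd := (PySem.Int.mod_eq_zero_iff_dvd i _).mp h
      rw [int_dvd_iff_toNat i _ (by omega) (by omega)] at hdvd
      have := (Nat.Prime.eq_one_or_self_of_dvd hpr _ hdvd).resolve_left (by omega)
      omega
    · rw [if_pos (by simpa using h)]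
      omega
  · have hsq : mF i * mF i ≤ i := by
      have := Nat.minFac_sq_le_self (by omega : 0 < i.toNat) hpr
      unfold mF
      nlinarith [this, (by omega : (i.toNat : Int) = i)]
    have hrun := pvSpfLoop_reach i hi hsq i.toNat 2 le_rfl hmf2
      (by intro q h1 h2 _; omega) (by omega)
    rw [hrun, if_neg]
    simp only [not_not]
    rw [PySem.Int.mod_eq_zero_iff_dvd]
    exact hmfdvd

-- ---- counting loops ----

theorem pvCountDiv_acc (p : Int) :
    ∀ (fuel : Nat) (m e : Int), pvCountDiv m p e fuel = e + pvCountDiv m p 0 fuel := by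
  intro fuel
  induction fuel with
  | zero => intro m e; simp [pvCountDiv]
  | succ fuel ih =>
    intro m e
    unfold pvCountDiv
    split
    · rw [ih _ (e + 1), ih _ (0 + 1)]; ring
    · simp

theorem floordiv_facts (m p : Int) (hm : 1 ≤ m) (hp : 2 ≤ p) (hd : p ∣ m) :
    1 ≤ PySem.Int.floordiv m p ∧ (PySem.Int.floordiv m p) * p = m ∧
      (PySem.Int.floordiv m p).toNat < m.toNat := by
  rw [PySem.Int.floordiv_eq_ediv_of_pos (by omega)]
  obtain ⟨c, rfl⟩ := hd
  rw [Int.mul_ediv_cancel_left _ (by omega : p ≠ 0)]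
  have hc : 1 ≤ c := by nlinarith
  refine ⟨hc, by ring, ?_⟩
  have : c < p * c := by nlinarith
  omega

theorem pvCountDiv_stable (p : Int) (hp : 2 ≤ p) :
    ∀ (M : Nat) (m : Int), 1 ≤ m → m.toNat ≤ M →
      ∀ (k k' : Nat), m.toNat ≤ k → m.toNat ≤ k' →
        pvCountDiv m p 0 k = pvCountDiv m p 0 k' := by
  intro M
  induction M with
  | zero => intro m h1 h2; omega
  | succ M ih =>
    intro m h1 h2 k k' hk hk'
    have hm1 : 1 ≤ m.toNat := by omega
    obtain ⟨a, rfl⟩ : ∃ a, k = a + 1 := ⟨k - 1, by omega⟩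
    obtain ⟨b, rfl⟩ : ∃ b, k' = b + 1 := ⟨k' - 1, by omega⟩
    by_cases h : PySem.Int.mod m p = 0
    · have hd : p ∣ m := (PySem.Int.mod_eq_zero_iff_dvd m p).mp h
      obtain ⟨h1', _, hlt⟩ := floordiv_facts m p h1 hp hd
      show pvCountDiv m p 0 (a + 1) = pvCountDiv m p 0 (b + 1)
      unfold pvCountDiv
      rw [if_pos h, if_pos h, pvCountDiv_acc p a, pvCountDiv_acc p b]
      rw [ih (PySem.Int.floordiv m p) h1' (by omega) a b (by omega) (by omega)]
    · show pvCountDiv m p 0 (a + 1) = pvCountDiv m p 0 (b + 1)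
      unfold pvCountDiv
      rw [if_neg h, if_neg h]

theorem pvWhileA_eq_insert (p : Int) :
    ∀ (fuel : Nat) (m : Int) (dic : PySem.Dict Int Int), PySem.Int.mod m p = 0 →
      pvWhileA dic m p (fuel + 1) =
        dic.insert p (dic.getD p 0 + pvCountDiv m p 0 (fuel + 1)) := by
  intro fuel
  induction fuel with
  | zero =>
    intro m dic h
    show pvWhileA dic m p 1 = _
    unfold pvWhileA pvCountDiv
    rw [if_pos h, if_pos h]
    rfl
  | succ fuel ih =>
    intro m dic h
    show pvWhileA dic m p (fuel + 1 + 1) = _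
    conv_lhs => unfold pvWhileA
    rw [if_pos h]
    conv_rhs => unfold pvCountDiv
    rw [if_pos h, pvCountDiv_acc p (fuel + 1)]
    by_cases h' : PySem.Int.mod (PySem.Int.floordiv m p) p = 0
    · rw [ih _ _ h', PySem.Dict.getD_insert_self, PySem.Dict.insert_insert_self]
      congr 1
      ring
    · have hL : pvWhileA (dic.insert p (dic.getD p 0 + 1)) (PySem.Int.floordiv m p) p (fuel + 1)
          = dic.insert p (dic.getD p 0 + 1) := by
        unfold pvWhileA
        rw [if_neg h']
      have hR : pvCountDiv (PySem.Int.floordiv m p) p 0 (fuel + 1) = 0 := by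
        unfold pvCountDiv
        rw [if_neg h']
      rw [hL, hR]
      norm_num

-- ---- A-side: the linear sieve computes the smallest prime factor ----

-- proof-side restatement of pvInner as structural recursion over the remaining primes
def innerList (n i : Int) : List Int → Array Int × Array Int → Array Int × Array Int
  | [], st => st
  | p :: ps, st =>
    if i * p ≤ n then
      let minp' := pvASet st.2 (i * p) p
      let vis' := pvASet st.1 (i * p) 1
      if PySem.Int.mod i p = 0 then (vis', minp') else innerList n i ps (vis', minp')
    else st

theorem pvInner_eq_innerList (n i : Int) (primes : Array Int) :
    ∀ (fuel j : Nat) (vis minp : Array Int), primes.size ≤ j + fuel →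
      pvInner n i primes vis minp j fuel = innerList n i (primes.toList.drop j) (vis, minp) := by
  intro fuel
  induction fuel with
  | zero =>
    intro j vis minp hle
    rw [List.drop_of_length_le (by simpa using hle)]
    simp [pvInner, innerList]
  | succ fuel ih =>
    intro j vis minp hle
    unfold pvInner
    by_cases hj : j < primes.size
    · rw [← List.getElem_cons_drop (by simpa using hj)]
      rw [Array.getElem_toList]
      simp only [hj, dif_pos]
      unfold innerList
      split
      · split
        · rfl
        · exact ih (j + 1) _ _ (by omega)
      · rfl
    · rw [List.drop_of_length_le (by simp; omega)]
      simp [hj, innerList]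

def markFold (i : Int) (F : List Int) (st : Array Int × Array Int) : Array Int × Array Int :=
  F.foldl (fun st p => (pvASet st.1 (i * p) 1, pvASet st.2 (i * p) p)) st

theorem innerList_eq_markFold (n i d : Int) (hi : 0 < i) (hd : PySem.Int.mod i d = 0) :
    ∀ (l : List Int) (st : Array Int × Array Int), l.Pairwise (· < ·) → d ∈ l →
      (∀ p ∈ l, p < d → ¬ PySem.Int.mod i p = 0) →
      innerList n i l st = markFold i (l.filter (fun p => decide (p ≤ d ∧ i * p ≤ n))) st := by
  intro l
  induction l with
  | nil => intro st _ hd; simp at hd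
  | cons p ps ih =>
    intro st hpw hdm hnd
    have hlt : ∀ q ∈ ps, p < q := fun q hq => (List.pairwise_cons.mp hpw).1 q hq
    have hpw' := (List.pairwise_cons.mp hpw).2
    by_cases hn1 : i * p ≤ n
    · by_cases hdv : PySem.Int.mod i p = 0
      · have hpd : p = d := by
          rcases List.mem_cons.mp hdm with h | h
          · omega
          · exact absurd hdv (hnd p (by simp) (hlt d h))
        subst hpd
        have hfil : ps.filter (fun q => decide (q ≤ p ∧ i * q ≤ n)) = [] := by
          rw [List.filter_eq_nil_iff]
          intro q hq
          have := hlt q hq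
          simp only [decide_eq_true_eq]
          omega
        unfold innerList
        rw [if_pos hn1, if_pos hdv]
        simp only [List.filter_cons, decide_eq_true_eq, hfil]
        rw [if_pos (⟨le_rfl, hn1⟩ : p ≤ p ∧ i * p ≤ n)]
        rfl
      · have hpd : p ≠ d := fun h => hdv (by rw [h]; exact hd)
        have hdm' : d ∈ ps := by
          rcases List.mem_cons.mp hdm with h | h
          · omega
          · exact h
        have hple : p ≤ d := le_of_lt (hlt d hdm')
        unfold innerList
        rw [if_pos hn1, if_neg hdv]
        rw [ih _ hpw' hdm' (fun q hq h1 h2 => hnd q (by simp [hq]) h1 h2)]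
        simp only [List.filter_cons, decide_eq_true_eq]
        rw [if_pos (⟨hple, hn1⟩ : p ≤ d ∧ i * p ≤ n)]
        rfl
    · have hfil : (p :: ps).filter (fun q => decide (q ≤ d ∧ i * q ≤ n)) = [] := by
        rw [List.filter_eq_nil_iff]
        intro q hq
        simp only [decide_eq_true_eq]
        rcases List.mem_cons.mp hq with h | h
        · subst h; omega
        · have h1 : p + 1 ≤ q := hlt q h
          have : i * (p + 1) ≤ i * q := by
            apply mul_le_mul_of_nonneg_left h1 (by omega)
          intro hc
          nlinarith
      unfold innerList
      rw [if_neg hn1, hfil]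
      rfl

theorem markFold_untouched (i : Int) (m : Nat) :
    ∀ (F : List Int) (st : Array Int × Array Int), (∀ p ∈ F, (i * p).toNat ≠ m) →
      ((markFold i F st).1.getD m 0 = st.1.getD m 0 ∧
       (markFold i F st).2.getD m 0 = st.2.getD m 0) := by
  intro F
  induction F with
  | nil => intro st _; exact ⟨rfl, rfl⟩
  | cons p ps ih =>
    intro st hF
    have hp := hF p (by simp)
    have step := ih (pvASet st.1 (i * p) 1, pvASet st.2 (i * p) p)
      (fun q hq => hF q (by simp [hq]))
    simp only [markFold, List.foldl_cons] at step ⊢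
    constructor
    · rw [step.1, getD_pvASet]; simp [hp]
    · rw [step.2, getD_pvASet]; simp [hp]

theorem markFold_size (i : Int) :
    ∀ (F : List Int) (st : Array Int × Array Int),
      (markFold i F st).1.size = st.1.size ∧ (markFold i F st).2.size = st.2.size := by
  intro F
  induction F with
  | nil => intro st; exact ⟨rfl, rfl⟩
  | cons p ps ih =>
    intro st
    have := ih (pvASet st.1 (i * p) 1, pvASet st.2 (i * p) p)
    simp only [markFold, List.foldl_cons] at this ⊢
    simpa [size_pvASet] using this

theorem markFold_touched (i : Int) (hi : 0 < i) (m : Nat) :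
    ∀ (F : List Int) (st : Array Int × Array Int), F.Pairwise (· < ·) → (∀ p ∈ F, 0 < p) →
      ∀ p ∈ F, (i * p).toNat = m → m < st.1.size → m < st.2.size →
      ((markFold i F st).1.getD m 0 = 1 ∧ (markFold i F st).2.getD m 0 = p) := by
  intro F
  induction F with
  | nil => intro st _ _ p hp; simp at hp
  | cons q qs ih =>
    intro st hpw hpos p hp hm h1 h2
    have hpw' := (List.pairwise_cons.mp hpw).2
    have hlt : ∀ r ∈ qs, q < r := fun r hr => (List.pairwise_cons.mp hpw).1 r hr
    rcases List.mem_cons.mp hp with hpq | hpq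
    · subst hpq
      have huntouch : ∀ r ∈ qs, (i * r).toNat ≠ m := by
        intro r hr hc
        have hqr : p < r := hlt r hr
        have h3 : i * p < i * r := by
          apply mul_lt_mul_of_pos_left hqr hi
        have h4 : 0 < i * p := mul_pos hi (hpos p (by simp))
        omega
      have step : markFold i (p :: qs) st
          = markFold i qs (pvASet st.1 (i * p) 1, pvASet st.2 (i * p) p) := rfl
      rw [step]
      obtain ⟨u1, u2⟩ := markFold_untouched i m qs _ huntouch
      rw [u1, u2, getD_pvASet, getD_pvASet]
      constructor
      · rw [if_pos ⟨hm, by omega⟩]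
      · rw [if_pos ⟨hm, by omega⟩]
    · have step : markFold i (q :: qs) st
          = markFold i qs (pvASet st.1 (i * q) 1, pvASet st.2 (i * q) q) := rfl
      rw [step]
      exact ih _ hpw' (fun r hr => hpos r (by simp [hr])) p hpq hm
        (by rw [size_pvASet]; omega) (by rw [size_pvASet]; omega)

-- the set of numbers the sieve has marked after processing 2..I
def Marked (N I m : Nat) : Prop := 2 ≤ m ∧ ¬ m.Prime ∧ m ≤ N ∧ m / m.minFac ≤ I

-- all primes ≤ I in increasing order, as the sieve's `primes` list
def primesList (I : Nat) : List Int :=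
  List.map (fun p : Nat => (p : Int)) ((List.range (I + 1)).filter (fun p => decide (Nat.Prime p)))

def SieveInv (n : Int) (I : Nat) (st : Array Int × Array Int × Array Int) : Prop :=
  st.1.size = (n + 10).toNat ∧ st.2.1.size = (n + 10).toNat ∧
  st.2.2.toList = primesList I ∧
  (∀ m : Nat, st.1.getD m 0 ≠ 0 ↔ Marked n.toNat I m) ∧
  (∀ m : Nat, (m.Prime ∧ m ≤ I) ∨ Marked n.toNat I m → st.2.1.getD m 0 = (m.minFac : Int))

theorem composite_facts (m : Nat) (h2 : 2 ≤ m) (hnp : ¬ m.Prime) :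
    2 ≤ m / m.minFac ∧ m / m.minFac < m ∧ (m / m.minFac) * m.minFac = m ∧
      m.minFac ≤ m / m.minFac := by
  have hf2 : 2 ≤ m.minFac := (Nat.minFac_prime (by omega)).two_le
  have hsq := Nat.minFac_sq_le_self (by omega) hnp
  have hdvd := Nat.minFac_dvd m
  refine ⟨?_, Nat.div_lt_self (by omega) (by omega), Nat.div_mul_cancel hdvd, ?_⟩
  · rw [Nat.le_div_iff_mul_le (by omega)]
    nlinarith
  · rw [Nat.le_div_iff_mul_le (by omega)]
    nlinarith

theorem minFac_mul (iN q : Nat) (hi : 2 ≤ iN) (hq : q.Prime) (hle : q ≤ iN.minFac) :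
    (iN * q).minFac = q ∧ ¬ (iN * q).Prime ∧ 2 ≤ iN * q ∧ (iN * q) / q = iN := by
  have hq2 := hq.two_le
  have hdvd : q ∣ iN * q := ⟨iN, by ring⟩
  have hub : (iN * q).minFac ≤ q := Nat.minFac_le_of_dvd hq2 hdvd
  have hm2 : 2 ≤ iN * q := by nlinarith
  have hfp := Nat.minFac_prime (by omega : iN * q ≠ 1)
  have hfd := Nat.minFac_dvd (iN * q)
  have hlb : q ≤ (iN * q).minFac := by
    rcases (Nat.Prime.dvd_mul hfp).mp hfd with h | h
    · have h1 := Nat.minFac_le_of_dvd hfp.two_le h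
      have h2' := Nat.minFac_le (by omega : 0 < iN)
      omega
    · have := Nat.le_of_dvd (by omega) h
      rcases (Nat.Prime.eq_one_or_self_of_dvd hq _ h) with h' | h'
      · exact absurd h' (by have := hfp.two_le; omega)
      · omega
  have hfq : (iN * q).minFac = q := by omega
  refine ⟨hfq, ?_, hm2, Nat.mul_div_left iN (by omega : 0 < q)⟩
  intro hpr
  rcases (Nat.Prime.eq_one_or_self_of_dvd hpr _ hdvd) with h | h
  · omega
  · nlinarith

theorem primesList_sorted (I : Nat) : (primesList I).Pairwise (· < ·) := by
  have h1 : ((List.range (I + 1)).filter (fun p => decide (Nat.Prime p))).Pairwise (· < ·) :=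
    List.Pairwise.filter _ List.pairwise_lt_range
  unfold primesList
  rw [List.pairwise_map]
  exact h1.imp (by intro a b h; exact_mod_cast h)

theorem primesList_mem (I q : Nat) : ((q : Int) ∈ primesList I) ↔ q.Prime ∧ q ≤ I := by
  unfold primesList
  simp only [List.mem_map, List.mem_filter, List.mem_range, decide_eq_true_eq]
  constructor
  · rintro ⟨a, ⟨ha1, ha2⟩, ha3⟩
    have : a = q := by exact_mod_cast ha3
    subst this
    exact ⟨ha2, by omega⟩
  · rintro ⟨h1, h2⟩
    exact ⟨q, ⟨by omega, h1⟩, rfl⟩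

theorem primesList_mem' (I : Nat) (x : Int) (hx : x ∈ primesList I) :
    ∃ q : Nat, x = (q : Int) ∧ q.Prime ∧ q ≤ I := by
  unfold primesList at hx
  simp only [List.mem_map, List.mem_filter, List.mem_range, decide_eq_true_eq] at hx
  obtain ⟨a, ⟨ha1, ha2⟩, ha3⟩ := hx
  exact ⟨a, ha3.symm, ha2, by omega⟩

theorem getD_replicate (sz m : Nat) : (Array.replicate sz (0 : Int)).getD m 0 = 0 := by
  rw [Array.getD_eq_getD_getElem?]
  by_cases hm : m < sz
  · simp [hm]
  · simp [hm]

theorem sieve_init (n : Int) :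
    SieveInv n 1 (Array.replicate (n + 10).toNat 0, Array.replicate (n + 10).toNat 0,
      (#[] : Array Int)) := by
  have hnm : ∀ m : Nat, ¬ Marked n.toNat 1 m := by
    intro m ⟨h2, hnp, _, hdiv⟩
    have := (composite_facts m h2 hnp).1
    omega
  refine ⟨by simp, by simp, (by decide : (#[] : Array Int).toList = primesList 1), ?_, ?_⟩
  · intro m
    simp only [getD_replicate]
    constructor
    · intro h; omega
    · intro h; exact absurd h (hnm m)
  · intro m hm
    rcases hm with ⟨hp, h1⟩ | hmk
    · exact absurd h1 (by have := hp.two_le; omega)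
    · exact absurd hmk (hnm m)

theorem primesList_succ (I : Nat) : primesList (I + 1) =
    primesList I ++ (if (I + 1).Prime then [((I + 1 : Nat) : Int)] else []) := by
  unfold primesList
  rw [List.range_succ, List.filter_append, List.map_append]
  congr 1
  by_cases h : (I + 1).Prime
  · simp [h]
  · simp [h]

theorem inner_spec (n : Int) (hn : 2 ≤ n) (I : Nat) (h2 : 2 ≤ I + 1)
    (primes' vis minp' : Array Int)
    (hpl : primes'.toList = primesList (I + 1))
    (hs1 : vis.size = (n + 10).toNat) (hs2 : minp'.size = (n + 10).toNat)
    (hvis : ∀ m : Nat, vis.getD m 0 ≠ 0 ↔ Marked n.toNat I m)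
    (hminp : ∀ m : Nat, (m.Prime ∧ m ≤ I + 1) ∨ Marked n.toNat I m →
      minp'.getD m 0 = (m.minFac : Int)) :
    (pvInner n ((I + 1 : Nat) : Int) primes' vis minp' 0 primes'.size).1.size = (n + 10).toNat ∧
    (pvInner n ((I + 1 : Nat) : Int) primes' vis minp' 0 primes'.size).2.size = (n + 10).toNat ∧
    (∀ m : Nat, (pvInner n ((I + 1 : Nat) : Int) primes' vis minp' 0 primes'.size).1.getD m 0 ≠ 0
      ↔ Marked n.toNat (I + 1) m) ∧
    (∀ m : Nat, (m.Prime ∧ m ≤ I + 1) ∨ Marked n.toNat (I + 1) m →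
      (pvInner n ((I + 1 : Nat) : Int) primes' vis minp' 0 primes'.size).2.getD m 0
        = (m.minFac : Int)) := by
  set iN := I + 1 with hiN
  set iZ := ((iN : Nat) : Int) with hiZ
  have hiZpos : 0 < iZ := by omega
  have hiZN : iZ.toNat = iN := by omega
  have hNn : ((n.toNat : Nat) : Int) = n := by omega
  have hfp : iN.minFac.Prime := Nat.minFac_prime (by omega)
  have hf2 : 2 ≤ iN.minFac := hfp.two_le
  have hfle : iN.minFac ≤ iN := Nat.minFac_le (by omega)
  have hfdvd : iN.minFac ∣ iN := Nat.minFac_dvd iN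
  set d := ((iN.minFac : Nat) : Int) with hd
  have hmodd : PySem.Int.mod iZ d = 0 := by
    rw [PySem.Int.mod_eq_zero_iff_dvd]
    exact Int.natCast_dvd_natCast.mpr hfdvd
  have hdmem : d ∈ primesList iN := (primesList_mem iN iN.minFac).mpr ⟨hfp, hfle⟩
  have hnd : ∀ p ∈ primesList iN, p < d → ¬ PySem.Int.mod iZ p = 0 := by
    intro p hp hlt hmod
    obtain ⟨q, rfl, hq, hqle⟩ := primesList_mem' iN p hp
    have hdvd : (q : Int) ∣ iZ := (PySem.Int.mod_eq_zero_iff_dvd _ _).mp hmod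
    have : q ∣ iN := Int.natCast_dvd_natCast.mp hdvd
    have := Nat.minFac_le_of_dvd hq.two_le this
    have : (q : Int) < d := hlt
    omega
  have hrw : pvInner n iZ primes' vis minp' 0 primes'.size
      = markFold iZ ((primesList iN).filter (fun p => decide (p ≤ d ∧ iZ * p ≤ n)))
          (vis, minp') := by
    rw [pvInner_eq_innerList n iZ primes' primes'.size 0 vis minp' (by omega)]
    rw [List.drop_zero, hpl]
    exact innerList_eq_markFold n iZ d hiZpos hmodd (primesList iN) (vis, minp')
      (primesList_sorted iN) hdmem hnd
  set F := (primesList iN).filter (fun p => decide (p ≤ d ∧ iZ * p ≤ n)) with hF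
  have hFsort : F.Pairwise (· < ·) := List.Pairwise.filter _ (primesList_sorted iN)
  have hFc : ∀ x ∈ F, ∃ q : Nat, x = (q : Int) ∧ q.Prime ∧ q ≤ iN.minFac ∧
      iN * q ≤ n.toNat := by
    intro x hx
    obtain ⟨hx1, hx2⟩ := List.mem_filter.mp hx
    simp only [decide_eq_true_eq] at hx2
    obtain ⟨q, rfl, hq, hqle⟩ := primesList_mem' iN x hx1
    refine ⟨q, rfl, hq, by omega, ?_⟩
    have hcast : ((iN * q : Nat) : Int) = iZ * (q : Int) := by push_cast; ring
    omega
  have hFpos : ∀ x ∈ F, 0 < x := by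
    intro x hx
    obtain ⟨q, rfl, hq, _, _⟩ := hFc x hx
    have := hq.two_le
    omega
  have hFr : ∀ q : Nat, q.Prime → q ≤ iN.minFac → iN * q ≤ n.toNat → ((q : Int) ∈ F) := by
    intro q hq hqle hqn
    refine List.mem_filter.mpr ⟨(primesList_mem iN q).mpr ⟨hq, by omega⟩, ?_⟩
    simp only [decide_eq_true_eq]
    have hcast : ((iN * q : Nat) : Int) = iZ * (q : Int) := by push_cast; ring
    refine ⟨by omega, by omega⟩
  have htouch : ∀ m : Nat, (∃ p ∈ F, (iZ * p).toNat = m) ↔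
      (∃ q : Nat, q.Prime ∧ q ≤ iN.minFac ∧ iN * q ≤ n.toNat ∧ m = iN * q) := by
    intro m
    constructor
    · rintro ⟨p, hpF, hpm⟩
      obtain ⟨q, rfl, hq, hqle, hqn⟩ := hFc p hpF
      refine ⟨q, hq, hqle, hqn, ?_⟩
      have hcast : ((iN * q : Nat) : Int) = iZ * (q : Int) := by push_cast; ring
      omega
    · rintro ⟨q, hq, hqle, hqn, rfl⟩
      refine ⟨(q : Int), hFr q hq hqle hqn, ?_⟩
      have hcast : ((iN * q : Nat) : Int) = iZ * (q : Int) := by push_cast; ring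
      omega
  have hmar : ∀ m : Nat, Marked n.toNat iN m ↔
      (Marked n.toNat I m ∨ ∃ q : Nat, q.Prime ∧ q ≤ iN.minFac ∧ iN * q ≤ n.toNat ∧
        m = iN * q) := by
    intro m
    constructor
    · rintro ⟨hm2, hmnp, hmN, hmdiv⟩
      by_cases hle : m / m.minFac ≤ I
      · exact Or.inl ⟨hm2, hmnp, hmN, hle⟩
      · have hdiv : m / m.minFac = iN := by omega
        obtain ⟨c1, c2, c3, c4⟩ := composite_facts m hm2 hmnp
        have hq : m.minFac.Prime := Nat.minFac_prime (by omega)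
        have hmm : m = iN * m.minFac := by rw [← hdiv]; omega
        have hiNdvd : iN ∣ m := ⟨m.minFac, hmm⟩
        have hfdm : iN.minFac ∣ m := dvd_trans (Nat.minFac_dvd iN) hiNdvd
        have hle2 : m.minFac ≤ iN.minFac :=
          Nat.minFac_le_of_dvd (Nat.minFac_prime (by omega : iN ≠ 1)).two_le hfdm
        exact Or.inr ⟨m.minFac, hq, hle2, by omega, hmm⟩
    · rintro (⟨hm2, hmnp, hmN, hmdiv⟩ | ⟨q, hq, hqle, hqn, rfl⟩)
      · exact ⟨hm2, hmnp, hmN, by omega⟩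
      · obtain ⟨hfq, hnp, hm2, hdivq⟩ := minFac_mul iN q (by omega) hq hqle
        refine ⟨hm2, hnp, hqn, ?_⟩
        rw [hfq, hdivq]
  rw [hrw]
  obtain ⟨ms1, ms2⟩ := markFold_size iZ F (vis, minp')
  refine ⟨by rw [ms1]; exact hs1, by rw [ms2]; exact hs2, ?_, ?_⟩
  · intro m
    by_cases ht : ∃ p ∈ F, (iZ * p).toNat = m
    · obtain ⟨p, hpF, hpm⟩ := ht
      obtain ⟨q, hpq, hq, hqle, hqn⟩ := hFc p hpF
      have hmlt : m < (n + 10).toNat := by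
        subst hpq
        have hcast : ((iN * q : Nat) : Int) = iZ * (q : Int) := by push_cast; ring
        omega
      obtain ⟨t1, t2⟩ := markFold_touched iZ hiZpos m F (vis, minp') hFsort hFpos p hpF hpm
        (by simpa [hs1] using hmlt) (by simpa [hs2] using hmlt)
      rw [t1]
      simp only [ne_eq, one_ne_zero, not_false_iff, true_iff]
      exact (hmar m).mpr (Or.inr ((htouch m).mp ⟨p, hpF, hpm⟩))
    · obtain ⟨u1, u2⟩ := markFold_untouched iZ m F (vis, minp') (fun p hp hc => ht ⟨p, hp, hc⟩)
      rw [u1, hvis m, hmar m]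
      have hnt : ¬ ∃ q : Nat, q.Prime ∧ q ≤ iN.minFac ∧ iN * q ≤ n.toNat ∧ m = iN * q :=
        fun hc => ht ((htouch m).mpr hc)
      constructor
      · exact Or.inl
      · rintro (h | h)
        · exact h
        · exact absurd h hnt
  · intro m hm
    by_cases ht : ∃ p ∈ F, (iZ * p).toNat = m
    · obtain ⟨p, hpF, hpm⟩ := ht
      obtain ⟨q, hpq, hq, hqle, hqn⟩ := hFc p hpF
      have hmeq : m = iN * q := by
        subst hpq
        have hcast : ((iN * q : Nat) : Int) = iZ * (q : Int) := by push_cast; ring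
        omega
      have hmlt : m < (n + 10).toNat := by omega
      obtain ⟨t1, t2⟩ := markFold_touched iZ hiZpos m F (vis, minp') hFsort hFpos p hpF hpm
        (by simpa [hs1] using hmlt) (by simpa [hs2] using hmlt)
      rw [t2, hpq, hmeq]
      obtain ⟨hfq, _, _, _⟩ := minFac_mul iN q (by omega) hq hqle
      rw [hfq]
    · obtain ⟨u1, u2⟩ := markFold_untouched iZ m F (vis, minp') (fun p hp hc => ht ⟨p, hp, hc⟩)
      rw [u2]
      apply hminp
      rcases hm with hml | hmr
      · exact Or.inl hml
      · rcases (hmar m).mp hmr with h | h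
        · exact Or.inr h
        · exact absurd ((htouch m).mpr h) ht

theorem sieve_step (n : Int) (hn : 2 ≤ n) (I : Nat) (hI : 1 ≤ I) (hIn : I + 1 ≤ n.toNat)
    (st : Array Int × Array Int × Array Int) (h : SieveInv n I st) :
    SieveInv n (I + 1) (pvSieveStep n st ((I + 1 : Nat) : Int)) := by
  obtain ⟨vis, minp, primes⟩ := st
  obtain ⟨hs1, hs2, hpl, hvis, hminp⟩ := h
  dsimp only at hs1 hs2 hpl hvis hminp
  set iN := I + 1 with hiN
  set iZ := ((iN : Nat) : Int) with hiZ
  have hiZN : iZ.toNat = iN := by omega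
  by_cases hpri : iN.Prime
  · -- i is prime: vis[i] = 0, so primes gets i appended and minp[i] := i
    have hv0 : pvAGet vis iZ = 0 := by
      unfold pvAGet
      rw [hiZN]
      by_contra hvne
      obtain ⟨_, hnp, _, _⟩ := (hvis iN).mp hvne
      exact hnp hpri
    have hstep : pvSieveStep n (vis, minp, primes) iZ =
        ((pvInner n iZ (primes.push iZ) vis (pvASet minp iZ iZ) 0 (primes.push iZ).size).1,
         (pvInner n iZ (primes.push iZ) vis (pvASet minp iZ iZ) 0 (primes.push iZ).size).2,
         primes.push iZ) := by
      dsimp only [pvSieveStep]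
      rw [if_pos hv0, if_pos hv0]
    have hpl' : (primes.push iZ).toList = primesList iN := by
      rw [Array.toList_push, hpl, hiN, primesList_succ, if_pos hpri]
    have hminp' : ∀ m : Nat, (m.Prime ∧ m ≤ iN) ∨ Marked n.toNat I m →
        (pvASet minp iZ iZ).getD m 0 = (m.minFac : Int) := by
      intro m hm
      rw [getD_pvASet]
      by_cases hmi : iZ.toNat = m ∧ m < minp.size
      · rw [if_pos hmi]
        have : m = iN := by omega
        subst this
        rw [hpri.minFac_eq]
      · rw [if_neg hmi]
        apply hminp
        rcases hm with ⟨hp, hle⟩ | hmk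
        · by_cases hmiN : m = iN
          · exfalso
            apply hmi
            constructor
            · omega
            · have := hpri.two_le
              omega
          · exact Or.inl ⟨hp, by omega⟩
        · by_cases hmiN : m = iN
          · exact absurd hpri (by rw [← hmiN]; exact hmk.2.1)
          · exact Or.inr hmk
    obtain ⟨c1, c2, c3, c4⟩ := inner_spec n hn I (by omega) (primes.push iZ) vis
      (pvASet minp iZ iZ) hpl' hs1 (by rw [size_pvASet]; exact hs2) hvis hminp'
    rw [hstep]
    exact ⟨c1, c2, hpl', c3, c4⟩
  · -- i is composite: vis[i] ≠ 0, nothing is appended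
    have hvne : pvAGet vis iZ ≠ 0 := by
      unfold pvAGet
      rw [hiZN]
      apply (hvis iN).mpr
      obtain ⟨_, hlt, _, _⟩ := composite_facts iN (by omega) hpri
      exact ⟨by omega, hpri, by omega, by omega⟩
    have hstep : pvSieveStep n (vis, minp, primes) iZ =
        ((pvInner n iZ primes vis minp 0 primes.size).1,
         (pvInner n iZ primes vis minp 0 primes.size).2, primes) := by
      dsimp only [pvSieveStep]
      rw [if_neg hvne, if_neg hvne]
    have hpl' : primes.toList = primesList iN := by
      rw [hpl, hiN, primesList_succ, if_neg hpri, List.append_nil]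
    have hminp' : ∀ m : Nat, (m.Prime ∧ m ≤ iN) ∨ Marked n.toNat I m →
        minp.getD m 0 = (m.minFac : Int) := by
      intro m hm
      apply hminp
      rcases hm with ⟨hp, hle⟩ | hmk
      · by_cases hmiN : m = iN
        · exact absurd (hmiN ▸ hp) hpri
        · exact Or.inl ⟨hp, by omega⟩
      · exact Or.inr hmk
    obtain ⟨c1, c2, c3, c4⟩ := inner_spec n hn I (by omega) primes vis minp hpl' hs1 hs2
      hvis hminp'
    rw [hstep]
    exact ⟨c1, c2, hpl', c3, c4⟩

theorem sieve_fold (n : Int) (hn : 2 ≤ n) :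
    ∀ I : Nat, 1 ≤ I → I ≤ n.toNat →
      SieveInv n I ((PySem.List.pyRange 2 ((I : Int) + 1) 1).foldl (pvSieveStep n)
        (Array.replicate (n + 10).toNat 0, Array.replicate (n + 10).toNat 0,
          (#[] : Array Int))) := by
  intro I
  induction I with
  | zero => omega
  | succ I ih =>
    intro _ hIn
    by_cases hI0 : I = 0
    · subst hI0
      rw [show (((1 : Nat) : Int) + 1) = 2 by norm_num, PySem.List.pyRange_one_eq_nil le_rfl]
      exact sieve_init n
    · have h1 : PySem.List.pyRange 2 (((I + 1 : Nat) : Int) + 1) 1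
          = PySem.List.pyRange 2 ((I : Int) + 1) 1 ++ [(I : Int) + 1] := by
        have : (((I + 1 : Nat) : Int) + 1) = ((I : Int) + 1) + 1 := by push_cast; ring
        rw [this, PySem.List.pyRange_one_succ_right (by omega)]
      rw [h1, List.foldl_append]
      have hstep := sieve_step n hn I (by omega) (by omega) _ (ih (by omega) (by omega))
      simpa using hstep

theorem getPrimesA_spec (n : Int) (hn : 2 ≤ n) (i : Int) (h2 : 2 ≤ i) (hin : i ≤ n) :
    pvAGet (getPrimesA n) i = mF i := by
  have hfold := sieve_fold n hn n.toNat (by omega) le_rfl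
  have hN : ((n.toNat : Int) + 1) = n + 1 := by omega
  rw [hN] at hfold
  obtain ⟨_, _, _, _, hminp⟩ := hfold
  unfold getPrimesA pvAGet mF
  set m := i.toNat with hm
  have h2m : 2 ≤ m := by omega
  apply hminp m
  by_cases hpr : m.Prime
  · exact Or.inl ⟨hpr, by omega⟩
  · obtain ⟨_, hlt, _, _⟩ := composite_facts m h2m hpr
    exact Or.inr ⟨h2m, hpr, by omega, by omega⟩

-- ---- per-iteration equality and the verdict ----

theorem step_eq (n i : Int) (hn : 2 ≤ n) (h2 : 2 ≤ i) (hin : i ≤ n)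
    (dic : PySem.Dict Int Int) :
    pvWhileA dic i (pvAGet (getPrimesA n) i) (i.toNat + 1) =
      (let p0 := pvSpfLoop i 2 i.toNat
       let p := if ¬ PySem.Int.mod i p0 = 0 then i else p0
       let e := pvCountDiv i p 0 i.toNat
       dic.insert p (dic.getD p 0 + e)) := by
  obtain ⟨hmf2, hmfdvd, _, _⟩ := mF_facts i h2
  have hmod : PySem.Int.mod i (mF i) = 0 := (PySem.Int.mod_eq_zero_iff_dvd _ _).mpr hmfdvd
  rw [getPrimesA_spec n hn i h2 hin]
  dsimp only
  rw [bSpf_eq_mF i h2]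
  rw [pvWhileA_eq_insert (mF i) i.toNat i dic hmod]
  rw [pvCountDiv_stable (mF i) hmf2 i.toNat i (by omega) le_rfl (i.toNat + 1) i.toNat
    (by omega) le_rfl]

-- ===== VERDICT (by name: the statement is the Claim_ definition above) =====
theorem depatch_spec : Claim_equal_depatch := by
  intro n _
  unfold Spec_depatch depatch depatch_alt
  by_cases hn : 2 ≤ n
  · dsimp only
    refine congrArg _ ?_
    refine PySem.List.foldl_congr_mem _ _ _ _ ?_
    intro dic i hi
    rw [PySem.List.mem_pyRange_one] at hi
    exact step_eq n i hn hi.1 (by omega) dic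
  · rw [PySem.List.pyRange_one_eq_nil (by omega)]
    rfl
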